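-- pv_equiv track=rewrite | github.com/swp0107/modern_labor | jumpingjack/jack.py | maxStep
-- ===== SOURCE A (Python) =====
-- def maxStep(n, k):
--     #pdb.set_trace()
--     #basecase
--     if (n == 1 and k == 1):
--         return 0
--     res=0
--     index=1
--     flag=0
--     while (1):
--         for i in range(index, n+1):
--             flag = 0
--             res = res + i
--             if (res == k):
--                 flag=1
--                 index+=1
--                 res=0
--                 break
--         if (flag == 0):
--             return (res)
-- ===== SOURCE B (Python) =====
-- def _has_tri(t, lo, hi):
--     # binary search: is there m in [lo, hi] with m*(m+1)//2 == t ?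
--     while lo <= hi:
--         m = (lo + hi) // 2
--         tm = m * (m + 1) // 2
--         if tm == t:
--             return True
--         if tm < t:
--             lo = m + 1
--         else:
--             hi = m - 1
--     return False
--
-- def maxStep(n, k):
--     if n < 1:
--         return 0
--     j = 1
--     while j <= n:
--         # start j "hits" k iff some partial sum j + ... + m equals k,
--         # i.e. T(m) = T(j-1) + k for some m in [j, n]
--         if not _has_tri((j - 1) * j // 2 + k, j, n):
--             break
--         j += 1
--     return n * (n + 1) // 2 - (j - 1) * j // 2
-- ===== Notes on version B (the rewrite author's own statement) =====
-- stated objective: faster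
-- what changed: Replaces A's restart-and-resum nested loops with per-start O(log n) binary search for a triangular number T(m)=T(j-1)+k, using the closed form T(n)-T(j-1) for the answer.
import Mathlib
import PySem

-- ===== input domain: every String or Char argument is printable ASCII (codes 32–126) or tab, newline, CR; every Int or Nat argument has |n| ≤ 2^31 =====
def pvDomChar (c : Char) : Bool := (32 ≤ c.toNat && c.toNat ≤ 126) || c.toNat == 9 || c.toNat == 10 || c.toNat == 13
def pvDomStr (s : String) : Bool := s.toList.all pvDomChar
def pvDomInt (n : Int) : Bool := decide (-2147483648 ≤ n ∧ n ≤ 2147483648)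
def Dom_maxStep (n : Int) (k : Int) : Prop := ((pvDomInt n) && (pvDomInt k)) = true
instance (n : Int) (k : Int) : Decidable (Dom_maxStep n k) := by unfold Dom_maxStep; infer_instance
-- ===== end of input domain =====

-- B replaces A's restart-and-resum nested loops by a per-start binary search for the
-- triangular number T(m) = T(j-1) + k plus the closed form T(n) - T(j-1); faster.

-- ===== PORT A =====
-- inner `for i in range(index, n+1)` loop: state (res, flag, index);
-- on res == k it sets flag=1, index+=1, res=0 and breaks, else flag stays 0.
def innerA (k : Int) : List Int → Int → Int → Int → Int × Int × Int
  | [], res, flag, index => (res, flag, index)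
  | i :: is, res, _, index =>
      let res' := res + i
      if res' = k then (0, 1, index + 1) else innerA k is res' 0 index

-- outer `while (1)` loop of A, with fuel (Python A terminates on every input the
-- claim covers; the fuel n.toNat + 2 is proved sufficient below).
def outerA (n k : Int) : Nat → Int → Int → Int → Int
  | 0, _, res, _ => res
  | fuel + 1, index, res, flag =>
      let r := innerA k (PySem.List.pyRange index (n + 1) 1) res flag index
      if r.2.1 = 0 then r.1 else outerA n k fuel r.2.2 0 r.2.1

def maxStep (n : Int) (k : Int) : Int :=
  if n = 1 ∧ k = 1 then 0
  else outerA n k (n.toNat + 2) 1 0 0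

-- ===== PORT B =====
def triB (m : Int) : Int := PySem.Int.floordiv (m * (m + 1)) 2

-- binary search of Source B's _has_tri (the locals m, tm are inlined)
def hasTri (t lo hi : Int) : Bool :=
  if h : lo ≤ hi then
    if triB (PySem.Int.floordiv (lo + hi) 2) = t then true
    else if triB (PySem.Int.floordiv (lo + hi) 2) < t then
      hasTri t (PySem.Int.floordiv (lo + hi) 2 + 1) hi
    else hasTri t lo (PySem.Int.floordiv (lo + hi) 2 - 1)
  else false
termination_by (hi + 1 - lo).toNat
decreasing_by
  · have := (PySem.Int.floordiv_two_mid_bounds h).1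
    omega
  · have := (PySem.Int.floordiv_two_mid_bounds h).2
    omega

-- Source B's `while j <= n` loop
def loopB (n k : Int) (j : Int) : Int :=
  if _h : j ≤ n then
    if hasTri (triB (j - 1) + k) j n then loopB n k (j + 1)
    else triB n - triB (j - 1)
  else triB n - triB (j - 1)
termination_by (n + 1 - j).toNat

def maxStep_alt (n : Int) (k : Int) : Int :=
  if n < 1 then 0 else loopB n k 1

-- ===== PRECONDITION & SPEC =====
def Spec_maxStep (n : Int) (k : Int) (out : Int) : Prop := out = maxStep_alt n k
instance (n : Int) (k : Int) (out : Int) : Decidable (Spec_maxStep n k out) := by unfold Spec_maxStep; infer_instance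

-- ===== CLAIM (what is proved, stated in full; the proofs are below) =====
def Claim_equal_maxStep : Prop := ∀ (n : Int) (k : Int), Dom_maxStep n k → Spec_maxStep n k (maxStep n k)

-- ===== LEMMAS AND PROOFS =====

theorem tri_two (m : Int) : 2 * triB m = m * (m + 1) := by
  unfold triB
  have h2 : (0:Int) < 2 := by omega
  rw [PySem.Int.floordiv_eq_ediv_of_pos h2]
  have : (2:Int) ∣ m * (m + 1) := (Int.even_mul_succ_self m).two_dvd
  omega

theorem tri_mono {a b : Int} (ha : 0 ≤ a) (hab : a ≤ b) : triB a ≤ triB b := by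
  have h1 := tri_two a
  have h2 := tri_two b
  nlinarith

-- the "hit" predicate: some partial sum j + ... + m (j ≤ m ≤ n) equals k
def Hit (n k j : Int) : Prop := ∃ m, j ≤ m ∧ m ≤ n ∧ triB m = triB (j - 1) + k

-- binary search is correct on [lo, hi] ⊆ [1, ∞)
theorem hasTri_correct_aux (t : Int) :
    ∀ (f : Nat) (lo hi : Int), (hi + 1 - lo).toNat ≤ f → 1 ≤ lo →
    (hasTri t lo hi = true ↔ ∃ m, lo ≤ m ∧ m ≤ hi ∧ triB m = t) := by
  intro f
  induction f with
  | zero =>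
      intro lo hi hf hlo
      have h : ¬ lo ≤ hi := by omega
      rw [hasTri, dif_neg h]
      constructor
      · intro hc; cases hc
      · rintro ⟨m, h1, h2, _⟩; omega
  | succ f ih =>
      intro lo hi hf hlo
      by_cases h : lo ≤ hi
      · have hb := PySem.Int.floordiv_two_mid_bounds h
        rw [hasTri, dif_pos h]
        by_cases heq : triB (PySem.Int.floordiv (lo + hi) 2) = t
        · rw [if_pos heq]
          constructor
          · intro _; exact ⟨PySem.Int.floordiv (lo + hi) 2, hb.1, hb.2, heq⟩
          · intro _; rfl
        · rw [if_neg heq]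
          by_cases hlt : triB (PySem.Int.floordiv (lo + hi) 2) < t
          · rw [if_pos hlt, ih (PySem.Int.floordiv (lo + hi) 2 + 1) hi (by omega) (by omega)]
            constructor
            · rintro ⟨m, h1, h2, h3⟩; exact ⟨m, by omega, h2, h3⟩
            · rintro ⟨m, h1, h2, h3⟩
              refine ⟨m, ?_, h2, h3⟩
              by_contra hc
              have := tri_mono (a := m) (b := PySem.Int.floordiv (lo + hi) 2) (by omega) (by omega)
              omega
          · rw [if_neg hlt, ih lo (PySem.Int.floordiv (lo + hi) 2 - 1) (by omega) hlo]
            constructor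
            · rintro ⟨m, h1, h2, h3⟩; exact ⟨m, h1, by omega, h3⟩
            · rintro ⟨m, h1, h2, h3⟩
              refine ⟨m, h1, ?_, h3⟩
              by_contra hc
              have := tri_mono (a := PySem.Int.floordiv (lo + hi) 2) (b := m) (by omega) (by omega)
              omega
      · rw [hasTri, dif_neg h]
        constructor
        · intro hc; cases hc
        · rintro ⟨m, h1, h2, _⟩; omega

theorem hasTri_correct (t lo hi : Int) (hlo : 1 ≤ lo) :
    hasTri t lo hi = true ↔ ∃ m, lo ≤ m ∧ m ≤ hi ∧ triB m = t :=
  hasTri_correct_aux t (hi + 1 - lo).toNat lo hi (le_refl _) hlo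

-- characterisation of A's inner for-loop started at i with res = T(i-1) - T(j-1)
theorem tri_step (i : Int) : triB (i - 1) + i = triB i := by
  have h1 := tri_two i
  have h2 := tri_two (i - 1)
  linarith

theorem innerA_char (n k j : Int) :
    ∀ (f : Nat) (i flag : Int), (n + 1 - i).toNat ≤ f → j ≤ i → i ≤ n + 1 →
    ((∃ m, i ≤ m ∧ m ≤ n ∧ triB m = triB (j - 1) + k) →
      innerA k (PySem.List.pyRange i (n + 1) 1) (triB (i - 1) - triB (j - 1)) flag j
        = (0, 1, j + 1)) ∧
    (¬ (∃ m, i ≤ m ∧ m ≤ n ∧ triB m = triB (j - 1) + k) →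
      innerA k (PySem.List.pyRange i (n + 1) 1) (triB (i - 1) - triB (j - 1)) flag j
        = (triB n - triB (j - 1), if i ≤ n then 0 else flag, j)) := by
  intro f
  induction f with
  | zero =>
      intro i flag hf hji hin1
      have hin : ¬ i ≤ n := by omega
      have hie : i = n + 1 := by omega
      rw [PySem.List.pyRange_one_eq_nil (by omega), innerA]
      constructor
      · rintro ⟨m, h1, h2, _⟩; omega
      · intro _; rw [if_neg hin, hie]; norm_num
  | succ f ih =>
      intro i flag hf hji hin1
      by_cases hin : i ≤ n
      · rw [PySem.List.pyRange_one_cons (by omega), innerA]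
        have hstep : triB (i - 1) - triB (j - 1) + i = triB i - triB (j - 1) := by
          have := tri_step i; linarith
        rw [hstep]
        by_cases hhit : triB i - triB (j - 1) = k
        · rw [if_pos hhit]
          exact ⟨fun _ => rfl, fun hc => absurd ⟨i, le_refl i, hin, by omega⟩ hc⟩
        · rw [if_neg hhit]
          have hi1 : triB (i + 1 - 1) = triB i := by norm_num
          have hrec := ih (i + 1) 0 (by omega) (by omega) (by omega)
          rw [hi1] at hrec
          constructor
          · rintro ⟨m, h1, h2, h3⟩
            by_cases hmi : m = i
            · subst hmi; exact absurd (by omega) hhit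
            · exact hrec.1 ⟨m, by omega, h2, h3⟩
          · intro hex
            rw [hrec.2 (by rintro ⟨m, h1, h2, h3⟩; exact hex ⟨m, by omega, h2, h3⟩)]
            by_cases hi1n : i + 1 ≤ n
            · rw [if_pos hi1n, if_pos hin]
            · rw [if_neg hi1n, if_pos hin]
      · rw [PySem.List.pyRange_one_eq_nil (by omega), innerA]
        have hie : i = n + 1 := by omega
        constructor
        · rintro ⟨m, h1, h2, _⟩; omega
        · intro _; rw [if_neg hin, hie]; norm_num

-- outer loop of A equals B's loop, given enough fuel and a start j' ≤ n that misses
theorem outerA_eq_loopB (n k : Int) :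
    ∀ (fuel : Nat) (j flag : Int), 1 ≤ j →
    (∃ j', j ≤ j' ∧ j' ≤ n ∧ ¬ Hit n k j') →
    (n + 1 - j).toNat ≤ fuel →
    outerA n k fuel j 0 flag = loopB n k j := by
  intro fuel
  induction fuel with
  | zero =>
      rintro j flag hj ⟨j', h1, h2, _⟩ hf
      omega
  | succ f ih =>
      rintro j flag hj ⟨j', hjj', hj'n, hmiss⟩ hf
      rw [outerA]
      have hchar := innerA_char n k j (n + 1 - j).toNat j flag (le_refl _) (le_refl j) (by omega)
      rw [sub_self] at hchar
      by_cases hhit : ∃ m, j ≤ m ∧ m ≤ n ∧ triB m = triB (j - 1) + k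
      · rw [hchar.1 hhit]
        have hjn : j ≤ n := by obtain ⟨m, h1, h2, _⟩ := hhit; omega
        have hne : j ≠ j' := by rintro rfl; exact hmiss hhit
        show (if (1:Int) = 0 then (0:Int) else outerA n k f (j+1) 0 1) = loopB n k j
        rw [if_neg (by norm_num)]
        rw [ih (j + 1) 1 (by omega) ⟨j', by omega, hj'n, hmiss⟩ (by omega)]
        conv_rhs => rw [loopB]
        rw [dif_pos hjn]
        rw [if_pos ((hasTri_correct _ j n hj).mpr hhit)]
      · rw [hchar.2 hhit]
        have hjn : j ≤ n := by
          rcases eq_or_lt_of_le hjj' with rfl | _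
          · exact hj'n
          · omega
        rw [if_pos hjn]
        show (if (0:Int) = 0 then triB n - triB (j - 1) else outerA n k f j 0 0) = loopB n k j
        rw [if_pos rfl]
        conv_rhs => rw [loopB]
        rw [dif_pos hjn]
        rw [if_neg (fun hc => hhit ((hasTri_correct _ j n hj).mp hc))]

-- Hit n k n ↔ k = n ;  and for n ≥ 2, k = n → ¬ Hit n k (n-1): a missing start exists
theorem exists_miss (n k : Int) (hn : 1 ≤ n) (hnb : ¬ (n = 1 ∧ k = 1)) :
    ∃ j', 1 ≤ j' ∧ j' ≤ n ∧ ¬ Hit n k j' := by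
  by_cases hlast : Hit n k n
  · -- Hit at n forces k = n
    obtain ⟨m, h1, h2, h3⟩ := hlast
    have hm : m = n := le_antisymm h2 h1
    subst hm
    have hk : k = m := by
      have h1 := tri_two m
      have h2 := tri_two (m - 1)
      nlinarith
    -- n = 1 impossible (would be the base case); so n ≥ 2, use j' = n - 1
    have hn2 : 2 ≤ m := by
      rcases lt_or_ge m 2 with h | h
      · exfalso; exact hnb ⟨by omega, by omega⟩
      · exact h
    refine ⟨m - 1, by omega, by omega, ?_⟩
    rintro ⟨m', h1', h2', h3'⟩
    have ha := tri_two m'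
    have hb := tri_two (m - 1 - 1)
    have hc := tri_two (m - 1)
    have hd := tri_two m
    have : m' = m - 1 ∨ m' = m := by omega
    rcases this with rfl | rfl
    · nlinarith
    · nlinarith
  · exact ⟨n, hn, le_refl n, hlast⟩

theorem main_eq (n k : Int) : maxStep n k = maxStep_alt n k := by
  unfold maxStep maxStep_alt
  by_cases hb : n = 1 ∧ k = 1
  · obtain ⟨rfl, rfl⟩ := hb
    norm_num
    rw [loopB]
    norm_num
    have h11 : hasTri (triB 0 + 1) 1 1 = true := by
      rw [hasTri_correct _ 1 1 (by norm_num)]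
      exact ⟨1, by norm_num, by norm_num, by decide⟩
    rw [if_pos h11]
    rw [loopB]
    norm_num
  · rw [if_neg hb]
    by_cases hn : n < 1
    · rw [if_pos hn]
      have hfuel : n.toNat + 2 = Nat.succ (n.toNat + 1) := rfl
      rw [hfuel, outerA]
      rw [PySem.List.pyRange_one_eq_nil (by omega)]
      rw [innerA]
      norm_num
    · rw [if_neg hn]
      have hex := exists_miss n k (by omega) hb
      obtain ⟨j', h1, h2, h3⟩ := hex
      exact outerA_eq_loopB n k (n.toNat + 2) 1 0 (by omega) ⟨j', h1, h2, h3⟩ (by omega)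

-- ===== VERDICT (by name: the statement is the Claim_ definition above) =====
theorem maxStep_spec : Claim_equal_maxStep := by
  intro n k _
  unfold Spec_maxStep
  exact main_eq n k
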